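-- pv_equiv track=rewrite | github.com/bstrance/PyProj | Illlogic/illlogic/illlogic.py | __gen_hint
-- ===== SOURCE A (Python) =====
-- def __gen_hint(table):
--     k = 0
--     hint = []
--     for i in table:
--         label =[]
--         label_temp = 0
--
--         for cell in i:
--             if cell == 0 and label_temp != 0:
--                 label.append(label_temp)
--                 label_temp = 0
--             elif cell == 1:
--                 label_temp += 1
--
--         if label_temp != 0:
--             label.append(label_temp)
--         hint.append(label)
--         k += 1
--     return hint
-- ===== SOURCE B (Python) =====
-- from itertools import groupby
--
-- def __gen_hint(table):
--     hint = []
--     for row in table: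
--         cells = [c for c in row if c == 0 or c == 1]
--         hint.append([sum(1 for _ in grp) for key, grp in groupby(cells) if key == 1])
--     return hint
-- ===== Notes on version B (the rewrite author's own statement) =====
-- stated objective: idiomatic
-- what changed: Replaces the hand-maintained run counter and 0/1 branching with a pre-filter to binary cells followed by itertools.groupby, emitting the lengths of the 1-groups.
import Mathlib
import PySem

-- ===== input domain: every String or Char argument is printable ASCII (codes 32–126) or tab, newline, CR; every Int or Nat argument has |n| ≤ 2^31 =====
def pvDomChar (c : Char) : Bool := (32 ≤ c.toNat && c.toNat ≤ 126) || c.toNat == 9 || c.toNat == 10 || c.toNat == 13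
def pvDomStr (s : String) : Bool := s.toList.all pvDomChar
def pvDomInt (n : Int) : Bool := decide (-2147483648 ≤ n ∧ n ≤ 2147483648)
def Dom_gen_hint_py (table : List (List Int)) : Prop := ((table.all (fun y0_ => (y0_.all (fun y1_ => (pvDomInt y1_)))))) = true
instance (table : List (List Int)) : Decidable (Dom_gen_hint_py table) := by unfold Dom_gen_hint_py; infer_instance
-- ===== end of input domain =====

-- B replaces A's hand-maintained run counter and 0/1 branching with a filter to
-- binary cells followed by grouping of consecutive equal cells (itertools.groupby),
-- keeping the lengths of the 1-groups; same behaviour, more idiomatic.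

-- ===== PORT A =====
-- inner loop body of A: state = (label, label_temp)
def ghStep (st : List Int × Int) (cell : Int) : List Int × Int :=
  if cell = 0 ∧ st.2 ≠ 0 then (st.1 ++ [st.2], 0)
  else if cell = 1 then (st.1, st.2 + 1)
  else st

def gen_hint_py (table : List (List Int)) : List (List Int) :=
  -- outer loop state = (hint, k); A's k counter is kept though unused in the result
  let res := table.foldl (fun (st : List (List Int) × Int) (i : List Int) =>
    let r := i.foldl ghStep ([], 0)
    let label := if r.2 ≠ 0 then r.1 ++ [r.2] else r.1
    (st.1 ++ [label], st.2 + 1)) ([], 0)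
  res.1

-- ===== PORT B =====
-- itertools.groupby: split a list into maximal runs of consecutive equal elements
def groupRuns : List Int → List (List Int)
  | [] => []
  | a :: t =>
    match groupRuns t with
    | [] => [[a]]
    | g :: gs => if g.head? = some a then (a :: g) :: gs else [a] :: g :: gs

-- lengths of the groups whose key is 1
def hintsOf (gs : List (List Int)) : List Int :=
  gs.filterMap (fun g => if g.head? = some 1 then some (g.length : Int) else none)

def gen_hint_py_alt (table : List (List Int)) : List (List Int) :=
  table.map (fun row => hintsOf (groupRuns (row.filter (fun c => decide (c = 0 ∨ c = 1)))))

-- ===== PRECONDITION & SPEC =====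
def Spec_gen_hint_py (table : List (List Int)) (out : List (List Int)) : Prop := out = gen_hint_py_alt table
instance (table : List (List Int)) (out : List (List Int)) : Decidable (Spec_gen_hint_py table out) := by unfold Spec_gen_hint_py; infer_instance

-- ===== CLAIM (what is proved, stated in full; the proofs are below) =====
def Claim_equal_gen_hint_py : Prop := ∀ (table : List (List Int)), Dom_gen_hint_py table → Spec_gen_hint_py table (gen_hint_py table)

-- ===== LEMMAS AND PROOFS =====

-- A's finished label for one row, starting from a pending counter
def rowA (temp : Int) (row : List Int) : List Int :=
  let r := row.foldl ghStep ([], temp)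
  if r.2 ≠ 0 then r.1 ++ [r.2] else r.1

theorem ghStep_prepend (row : List Int) : ∀ (acc : List Int) (temp : Int),
    row.foldl ghStep (acc, temp)
      = (acc ++ (row.foldl ghStep ([], temp)).1, (row.foldl ghStep ([], temp)).2) := by
  induction row with
  | nil => intro acc temp; simp
  | cons c t ih =>
    intro acc temp
    simp only [List.foldl_cons]
    by_cases h0 : c = 0 ∧ temp ≠ 0
    · simp [ghStep, h0, ih (acc ++ [temp]) 0, ih [temp] 0, List.append_assoc]
    · by_cases h1 : c = 1
      · simp [ghStep, h1, ih acc (temp + 1)]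
      · simp [ghStep, h0, h1, ih acc temp]

theorem rowA_nil (temp : Int) : rowA temp [] = if temp ≠ 0 then [temp] else [] := rfl

theorem rowA_zero (temp : Int) (t : List Int) :
    rowA temp (0 :: t) = if temp ≠ 0 then temp :: rowA 0 t else rowA 0 t := by
  by_cases h : temp = 0
  · simp [rowA, ghStep, h]
  · simp only [rowA, List.foldl_cons]
    have hstep : ghStep ([], temp) 0 = ([temp], 0) := by simp [ghStep, h]
    rw [hstep, ghStep_prepend t [temp] 0, if_pos h]
    split <;> simp

theorem rowA_one (temp : Int) (t : List Int) : rowA temp (1 :: t) = rowA (temp + 1) t := by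
  simp [rowA, ghStep]

theorem rowA_skip (c temp : Int) (t : List Int) (h0 : c ≠ 0) (h1 : c ≠ 1) :
    rowA temp (c :: t) = rowA temp t := by
  simp [rowA, ghStep, h0, h1]

theorem groupRuns_head (a : Int) (l : List Int) :
    ∃ g gs, groupRuns (a :: l) = g :: gs ∧ g.head? = some a := by
  show ∃ g gs, (match groupRuns l with
    | [] => [[a]]
    | g :: gs => if g.head? = some a then (a :: g) :: gs else [a] :: g :: gs) = g :: gs ∧ g.head? = some a
  cases groupRuns l with
  | nil => exact ⟨[a], [], rfl, rfl⟩
  | cons g gs =>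
    by_cases h : g.head? = some a
    · exact ⟨a :: g, gs, by simp [h], rfl⟩
    · exact ⟨[a], g :: gs, by simp [h], rfl⟩

theorem hints_zero (l : List Int) : hintsOf (groupRuns (0 :: l)) = hintsOf (groupRuns l) := by
  show hintsOf (match groupRuns l with
    | [] => [[(0:Int)]]
    | g :: gs => if g.head? = some 0 then ((0:Int) :: g) :: gs else [(0:Int)] :: g :: gs)
    = hintsOf (groupRuns l)
  cases groupRuns l with
  | nil => simp [hintsOf]
  | cons g gs =>
    by_cases h : g.head? = some 0
    · simp [hintsOf, h]
    · simp [hintsOf, h]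

theorem hints_ones_zero (l : List Int) : ∀ n : ℕ,
    hintsOf (groupRuns (List.replicate (n + 1) 1 ++ 0 :: l))
      = ((n : Int) + 1) :: hintsOf (groupRuns l) := by
  intro n
  induction n with
  | zero =>
    obtain ⟨g, gs, hg, hh⟩ := groupRuns_head 0 l
    have htail : hintsOf (groupRuns l) = hintsOf gs := by
      rw [← hints_zero l, hg]; simp [hintsOf, hh]
    simp only [List.replicate, List.cons_append, List.nil_append]
    show hintsOf (match groupRuns (0 :: l) with
      | [] => [[(1:Int)]]
      | g :: gs => if g.head? = some 1 then ((1:Int) :: g) :: gs else [(1:Int)] :: g :: gs)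
      = ((0 : Int) + 1) :: hintsOf (groupRuns l)
    rw [hg]
    have hne : ¬ (g.head? = some 1) := by rw [hh]; decide
    simp only [hne, reduceIte]
    simp [hintsOf, hh]
    simp only [hintsOf] at htail
    exact htail.symm
  | succ n ih =>
    obtain ⟨g, gs, hg, hh⟩ := groupRuns_head 1 (List.replicate n 1 ++ 0 :: l)
    have hrep : List.replicate (n + 1) 1 ++ 0 :: l = 1 :: (List.replicate n 1 ++ 0 :: l) := by
      simp [List.replicate]
    rw [hrep] at ih
    have hsplit : hintsOf (g :: gs) = (g.length : Int) :: hintsOf gs := by simp [hintsOf, hh]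
    rw [hg, hsplit] at ih
    have hlen : (g.length : Int) = (n : Int) + 1 := (List.cons.injEq _ _ _ _ ▸ ih).1
    have htail : hintsOf gs = hintsOf (groupRuns l) := (List.cons.injEq _ _ _ _ ▸ ih).2
    have hrep2 : List.replicate (n + 2) 1 ++ 0 :: l
        = 1 :: 1 :: (List.replicate n 1 ++ 0 :: l) := by simp [List.replicate]
    rw [hrep2]
    show hintsOf (match groupRuns (1 :: (List.replicate n 1 ++ 0 :: l)) with
      | [] => [[(1:Int)]]
      | g :: gs => if g.head? = some 1 then ((1:Int) :: g) :: gs else [(1:Int)] :: g :: gs)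
      = ((n : Int) + 1 + 1) :: hintsOf (groupRuns l)
    rw [hg]
    simp only [hh, reduceIte]
    have hstep : hintsOf ((1 :: g) :: gs) = ((g.length : Int) + 1) :: hintsOf gs := by
      simp [hintsOf]
    rw [hstep, hlen, htail]

theorem groupRuns_ones : ∀ n : ℕ, groupRuns (List.replicate (n + 1) 1) = [List.replicate (n + 1) (1 : Int)] := by
  intro n
  induction n with
  | zero => rfl
  | succ n ih =>
    show (match groupRuns (List.replicate (n + 1) 1) with
      | [] => [[(1:Int)]]
      | g :: gs => if g.head? = some 1 then ((1:Int) :: g) :: gs else [(1:Int)] :: g :: gs)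
      = [List.replicate (n + 2) (1 : Int)]
    rw [ih]
    simp [List.replicate]

theorem hints_ones (n : ℕ) :
    hintsOf (groupRuns (List.replicate n 1)) = if n = 0 then [] else [(n : Int)] := by
  cases n with
  | zero => rfl
  | succ n =>
    rw [groupRuns_ones n]
    have hhd : (List.replicate (n + 1) (1 : Int)).head? = some 1 := rfl
    simp [hintsOf, hhd]

theorem rowA_eq (row : List Int) : ∀ n : ℕ,
    rowA (n : Int) row
      = hintsOf (groupRuns (List.replicate n 1 ++ row.filter (fun c => decide (c = 0 ∨ c = 1)))) := by
  induction row with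
  | nil =>
    intro n
    rw [rowA_nil]
    simp only [List.filter_nil, List.append_nil, hints_ones n]
    rcases Nat.eq_zero_or_pos n with h | h
    · simp [h]
    · have hn : n ≠ 0 := by omega
      have hni : (n : Int) ≠ 0 := by exact_mod_cast hn
      rw [if_pos hni, if_neg hn]
  | cons c t ih =>
    intro n
    by_cases h0 : c = 0
    · subst h0
      have hf : List.filter (fun c => decide (c = 0 ∨ c = 1)) (0 :: t)
          = 0 :: List.filter (fun c => decide (c = 0 ∨ c = 1)) t := by simp
      rw [rowA_zero, hf]
      rcases Nat.eq_zero_or_pos n with h | h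
      · subst h
        have h0' := ih 0
        simp only [Int.natCast_zero, List.replicate_zero, List.nil_append] at h0' ⊢
        rw [if_neg (by simp), hints_zero, h0']
      · obtain ⟨m, rfl⟩ := Nat.exists_eq_succ_of_ne_zero (by omega : n ≠ 0)
        have hne : ((m + 1 : ℕ) : Int) ≠ 0 := by push_cast; omega
        rw [if_pos hne, hints_ones_zero _ m]
        have h0' := ih 0
        simp only [Int.natCast_zero, List.replicate_zero, List.nil_append] at h0'
        rw [h0']
        push_cast
        ring_nf
    · by_cases h1 : c = 1
      · subst h1
        rw [rowA_one]
        have hf : List.filter (fun c => decide (c = 0 ∨ c = 1)) (1 :: t)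
            = 1 :: List.filter (fun c => decide (c = 0 ∨ c = 1)) t := by simp
        rw [hf]
        have hr : List.replicate n (1 : Int) ++ 1 :: List.filter (fun c => decide (c = 0 ∨ c = 1)) t
            = List.replicate (n + 1) (1 : Int) ++ List.filter (fun c => decide (c = 0 ∨ c = 1)) t := by
          simp [List.replicate_succ', List.append_assoc]
        rw [hr]
        have := ih (n + 1)
        push_cast at this ⊢
        exact this
      · rw [rowA_skip c _ t h0 h1]
        have hf : List.filter (fun c => decide (c = 0 ∨ c = 1)) (c :: t)
            = List.filter (fun c => decide (c = 0 ∨ c = 1)) t := by simp [h0, h1]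
        rw [hf]
        exact ih n

theorem outer_prepend (table : List (List Int)) :
    ∀ (acc : List (List Int)) (k : Int),
    (table.foldl (fun (st : List (List Int) × Int) (i : List Int) =>
        let r := i.foldl ghStep ([], 0)
        let label := if r.2 ≠ 0 then r.1 ++ [r.2] else r.1
        (st.1 ++ [label], st.2 + 1)) (acc, k)).1
      = acc ++ table.map (fun i => rowA 0 i) := by
  induction table with
  | nil => intro acc k; simp
  | cons i t ih =>
    intro acc k
    simp only [List.foldl_cons, List.map_cons]
    rw [ih]
    simp [rowA, List.append_assoc]

-- ===== VERDICT (by name: the statement is the Claim_ definition above) =====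

theorem gen_hint_py_spec : Claim_equal_gen_hint_py := by
  intro table _
  show gen_hint_py table = gen_hint_py_alt table
  unfold gen_hint_py gen_hint_py_alt
  rw [outer_prepend table [] 0]
  simp only [List.nil_append]
  apply List.map_congr_left
  intro row _
  have := rowA_eq row 0
  simpa using this
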